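-- pv_equiv track=rewrite | github.com/szaboeman/adventOfCode2015python | day17/day17.py | solvedB
-- ===== SOURCE A (Python) =====
-- import itertools
--
-- def solvedB(data):
--     good=False
--     c=0
--     for i in range(1,len(data)):
--         perm=list(itertools.combinations(data, i))
--         for p in perm:
--             if sum(p)==150:
--                 good=True
--                 c+=1
--         if good:
--             return c
-- ===== SOURCE B (Python) =====
-- def solvedB(data):
--     n = len(data)
--
--     def cnt(i, k, t):
--         # number of ways to pick k elements from data[i:] summing to t
--         if k == 0:
--             return 1 if t == 0 else 0
--         if i == n:
--             return 0
--         return cnt(i + 1, k - 1, t - data[i]) + cnt(i + 1, k, t)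
--
--     for k in range(1, n):
--         c = cnt(0, k, 150)
--         if c:
--             return c
--     return None
-- ===== Notes on version B (the rewrite author's own statement) =====
-- stated objective: alternative
-- what changed: B counts subsets of each size by an include/exclude structural recursion instead of materializing every itertools.combinations tuple and summing it, and drops A's redundant 'good' flag/accumulated counter.
import Mathlib
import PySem

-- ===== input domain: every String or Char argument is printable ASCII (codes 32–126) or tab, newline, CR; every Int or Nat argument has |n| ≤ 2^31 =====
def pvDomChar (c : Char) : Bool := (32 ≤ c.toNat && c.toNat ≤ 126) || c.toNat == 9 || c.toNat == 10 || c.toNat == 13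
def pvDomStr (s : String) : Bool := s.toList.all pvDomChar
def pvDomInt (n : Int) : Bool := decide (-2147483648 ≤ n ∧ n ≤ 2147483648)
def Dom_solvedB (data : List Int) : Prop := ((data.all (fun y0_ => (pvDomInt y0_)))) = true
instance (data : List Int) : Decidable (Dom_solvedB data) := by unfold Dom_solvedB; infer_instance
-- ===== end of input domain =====

-- B replaces A's enumeration of itertools.combinations tuples by an include/exclude
-- counting recursion (alternative decomposition, no asymptotic speed claim).

-- ===== PORT A =====
-- inner 'for p in perm' loop of A, over state (good, c)
def solvedBInner (perm : List (List Int)) (gc : Bool × Int) : Bool × Int :=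
  perm.foldl (fun gc p => if p.sum == 150 then (true, gc.2 + 1) else gc) gc

-- outer 'for i in range(1, len(data))' loop of A, carrying (good, c)
def solvedBLoop (data : List Int) (good : Bool) (c : Int) : List Int → Option Int
  | [] => none
  | i :: rest =>
      let gc := solvedBInner (PySem.List.combinations data i.toNat) (good, c)
      if gc.1 then some gc.2 else solvedBLoop data gc.1 gc.2 rest

def solvedB (data : List Int) : Option Int :=
  solvedBLoop data false 0 (PySem.List.pyRange 1 ((data.length : Int)) 1)

-- ===== PORT B =====
-- cnt(i, k, t) of Source B: recursion on the suffix data[i:]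
def cntB : List Int → Nat → Int → Int
  | _, 0, t => if t == 0 then 1 else 0
  | [], _ + 1, _ => 0
  | x :: xs, k + 1, t => cntB xs k (t - x) + cntB xs (k + 1) t

-- 'for k in range(1, n)' loop of Source B
def solvedBAltLoop (data : List Int) : List Int → Option Int
  | [] => none
  | k :: rest =>
      let c := cntB data k.toNat 150
      if c ≠ 0 then some c else solvedBAltLoop data rest

def solvedB_alt (data : List Int) : Option Int :=
  solvedBAltLoop data (PySem.List.pyRange 1 ((data.length : Int)) 1)

-- ===== PRECONDITION & SPEC =====
def Spec_solvedB (data : List Int) (out : Option Int) : Prop := out = solvedB_alt data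
instance (data : List Int) (out : Option Int) : Decidable (Spec_solvedB data out) := by unfold Spec_solvedB; infer_instance

-- ===== CLAIM (what is proved, stated in full; the proofs are below) =====
def Claim_equal_solvedB : Prop := ∀ (data : List Int), Dom_solvedB data → Spec_solvedB data (solvedB data)

-- ===== LEMMAS AND PROOFS =====

-- A's inner loop computes (good || ∃ hit, c + #hits)
theorem solvedBInner_eq (perm : List (List Int)) (g : Bool) (c : Int) :
    solvedBInner perm (g, c)
      = (g || perm.any (fun p => p.sum == 150),
         c + (perm.countP (fun p => p.sum == 150) : Int)) := by
  induction perm generalizing g c with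
  | nil => simp [solvedBInner]
  | cons p rest ih =>
      simp only [solvedBInner] at ih ⊢
      rw [List.foldl_cons]
      by_cases h : p.sum = 150
      · have hb : (p.sum == 150) = true := by simp [h]
        simp only [hb, if_true]
        rw [ih true (c + 1)]
        simp only [List.any_cons, hb, Bool.true_or, Bool.or_true, List.countP_cons,
          if_true, Prod.mk.injEq, Nat.cast_add, Nat.cast_one]
        exact ⟨trivial, by ring⟩
      · have hb : (p.sum == 150) = false := by simp [h]
        simp only [hb, Bool.false_eq_true, if_false]
        rw [ih g c]
        simp [List.any_cons, hb]

-- B's counter counts exactly the combinations summing to t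
theorem cntB_eq (xs : List Int) (k : Nat) (t : Int) :
    cntB xs k t = ((PySem.List.combinations xs k).countP (fun p => p.sum == t) : Int) := by
  induction xs generalizing k t with
  | nil =>
      cases k with
      | zero =>
          simp only [cntB, PySem.List.combinations_zero]
          by_cases h : t = 0
          · simp [h]
          · have h' : ¬ ((0 : Int) = t) := fun e => h e.symm
            simp [h, h']
      | succ k => simp [cntB, PySem.List.combinations_nil_succ]
  | cons x xs ih =>
      cases k with
      | zero =>
          simp only [cntB, PySem.List.combinations_zero]
          by_cases h : t = 0
          · simp [h]
          · have h' : ¬ ((0 : Int) = t) := fun e => h e.symm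
            simp [h, h']
      | succ k =>
          simp only [cntB, PySem.List.combinations_cons_succ, List.countP_append,
            List.countP_map, ih]
          have hpred : ∀ p : List Int, p ∈ PySem.List.combinations xs k →
              (((fun p : List Int => p.sum == t) ∘ (x :: ·)) p = true
                ↔ (fun p : List Int => p.sum == t - x) p = true) := by
            intro p _
            simp only [Function.comp_apply, List.sum_cons, beq_iff_eq]
            omega
          rw [List.countP_congr hpred]
          push_cast
          ring

-- the two outer loops agree as long as A enters each iteration with (false, 0)
theorem loops_eq (data : List Int) (is : List Int) :
    solvedBLoop data false 0 is = solvedBAltLoop data is := by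
  induction is with
  | nil => rfl
  | cons i rest ih =>
      simp only [solvedBLoop, solvedBAltLoop, solvedBInner_eq, cntB_eq, Bool.false_or,
        zero_add]
      set L := PySem.List.combinations data i.toNat with hL
      by_cases h : L.any (fun p => p.sum == 150) = true
      · have hpos : 0 < L.countP (fun p => p.sum == 150) :=
          List.countP_pos_iff.mpr (List.any_eq_true.mp h)
        have hne : ((L.countP (fun p => p.sum == 150) : Int)) ≠ 0 := by
          exact_mod_cast hpos.ne'
        rw [if_pos h, if_pos hne]
      · have hz : L.countP (fun p => p.sum == 150) = 0 := by
          rw [List.countP_eq_zero]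
          intro a ha hp
          exact h (List.any_eq_true.mpr ⟨a, ha, hp⟩)
        have hfalse : L.any (fun p => p.sum == 150) = false := by
          simpa using h
        have hcz : ((L.countP (fun p => p.sum == 150) : Int)) = 0 := by
          rw [hz]; rfl
        rw [if_neg h, if_neg (by simp [hcz]), hfalse, hcz]
        exact ih

-- ===== VERDICT (by name: the statement is the Claim_ definition above) =====
theorem solvedB_spec : Claim_equal_solvedB := by
  intro data _
  show solvedB data = solvedB_alt data
  unfold solvedB solvedB_alt
  exact loops_eq data _
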